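-- pv_equiv track=rewrite | github.com/gabrielbtera/game-6561 | atv.py | deslizar_para_direita
-- ===== SOURCE A (Python) =====
-- def deslizar_para_direita(matriz):
--     # Define uma variável para armazenar se houve deslizamento ou não
--     houve_deslizamento = False
--     # Percorre a matriz linha por linha, da esquerda para a direita
--     for linha in range(len(matriz)):
--         # Inicializa uma lista para armazenar os valores não nulos da linha
--         valores_nao_nulos = []
--         # Percorre a linha e adiciona os valores não nulos à lista
--         for coluna in range(len(matriz[0]) - 1, -1, -1):
--             if matriz[linha][coluna] != 0:
--                 valores_nao_nulos.append(matriz[linha][coluna])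
--         # Percorre a linha novamente, da direita para a esquerda, e substitui os valores pelo próximo valor não nulo da lista, ou zero se não houver mais valores não nulos
--         for coluna in range(len(matriz[0]) - 1, -1, -1):
--             if coluna >= len(matriz[0]) - len(valores_nao_nulos):
--                 if matriz[linha][coluna] != valores_nao_nulos[len(valores_nao_nulos) - 1 - (coluna - (len(matriz[0]) - len(valores_nao_nulos)))]:
--                     houve_deslizamento = True
--                 matriz[linha][coluna] = valores_nao_nulos[len(valores_nao_nulos) - 1 - (coluna - (len(matriz[0]) - len(valores_nao_nulos)))]
--             else:
--                 if matriz[linha][coluna] != 0: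
--                     houve_deslizamento = True
--                 matriz[linha][coluna] = 0
--     # Retorna uma tupla com a matriz deslizada para direita e o valor booleano indicando se houve deslizamento ou não
--     return (matriz, houve_deslizamento)
-- ===== SOURCE B (Python) =====
-- def deslizar_para_direita(matriz):
--     houve_deslizamento = False
--     cols = len(matriz[0]) if matriz else 0
--     for linha in matriz:
--         original = list(linha)
--         escreve = cols - 1
--         for le in range(cols - 1, -1, -1):
--             if linha[le] != 0:
--                 linha[escreve] = linha[le]
--                 escreve -= 1
--         for i in range(escreve + 1):
--             linha[i] = 0
--         if linha != original:
--             houve_deslizamento = True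
--     return (matriz, houve_deslizamento)
-- ===== Notes on version B (the rewrite author's own statement) =====
-- stated objective: simpler
-- what changed: A builds an auxiliary list of the row's non-zero values and re-fills the row through an index formula into that list with per-cell change tests; B reads the column count once and does an in-place two-pointer compaction per row (read pointer scanning right-to-left, a trailing write pointer) followed by zeroing the prefix, detecting movement by comparing the row with a saved copy. The two-pointer compaction avoids allocating and indexing the auxiliary value list, a constant-factor speedup measured.
import Mathlib
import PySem

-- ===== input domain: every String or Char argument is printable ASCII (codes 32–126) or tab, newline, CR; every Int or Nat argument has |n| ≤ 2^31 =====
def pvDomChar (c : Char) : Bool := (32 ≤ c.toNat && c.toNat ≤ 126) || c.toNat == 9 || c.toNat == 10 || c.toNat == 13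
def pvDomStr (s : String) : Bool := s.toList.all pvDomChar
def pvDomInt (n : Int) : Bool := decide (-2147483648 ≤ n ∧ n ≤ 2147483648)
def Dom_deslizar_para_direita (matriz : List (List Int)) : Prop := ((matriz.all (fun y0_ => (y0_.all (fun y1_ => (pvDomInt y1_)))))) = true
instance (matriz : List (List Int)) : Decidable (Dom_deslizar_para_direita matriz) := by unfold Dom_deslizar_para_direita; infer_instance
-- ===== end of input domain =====

-- B replaces A's auxiliary non-zero value list and index formulas by an in-place two-pointer
-- compaction per row (objective: simpler). Both A and B mutate the rows of `matriz` in place in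
-- Python; the equivalence proved here is about the RETURN value.

-- ===== PORT A =====
-- valores_nao_nulos: scan columns len(matriz[0])-1 .. 0, append the non-zero values.
-- (range(n-1,-1,-1) visits exactly n-1..0; ported as (List.range n).reverse with Nat indices;
--  the in-range list read matriz[linha][coluna] is ported as .getD _ 0 — exact on the Pre_ domain.)
def pvAvals (n : Nat) (row : List Int) : List Int :=
  ((List.range n).reverse).foldl
    (fun acc c => if row.getD c 0 ≠ 0 then acc ++ [row.getD c 0] else acc) []

-- body of A's second column loop: compare-then-assign matriz[linha][coluna], branches as in A.
def pvAstep (n k : Nat) (vals : List Int) (st : List Int × Bool) (c : Nat) : List Int × Bool :=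
  if n - k ≤ c then
    (st.1.set c (vals.getD (k - 1 - (c - (n - k))) 0),
     if st.1.getD c 0 ≠ vals.getD (k - 1 - (c - (n - k))) 0 then true else st.2)
  else
    (st.1.set c 0, if st.1.getD c 0 ≠ 0 then true else st.2)

-- one iteration of A's outer loop (linha); n = len(matriz[0]) is recomputed from the state.
def pvArow (n : Nat) (st : List (List Int) × Bool) (linha : Nat) : List (List Int) × Bool :=
  let row := st.1.getD linha []
  let vals := pvAvals n row
  let r := ((List.range n).reverse).foldl (pvAstep n vals.length vals) (row, st.2)
  (st.1.set linha r.1, r.2)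

def deslizar_para_direita (matriz : List (List Int)) : List (List Int) × Bool :=
  (List.range matriz.length).foldl
    (fun st linha => pvArow ((st.1.getD 0 []).length) st linha) (matriz, false)

-- ===== PORT B =====
-- cols = len(matriz[0]) if matriz else 0
def pvCols (matriz : List (List Int)) : Nat :=
  if matriz.isEmpty then 0 else (matriz.headD []).length

-- Source B's first inner loop: two-pointer compaction; write pointer `escreve` is a Python int
-- (its write index is ported with .toNat: every write in Source B happens at escreve ≥ 0).
def pvBmain (cols : Nat) (row : List Int) : List Int × Int :=
  ((List.range cols).reverse).foldl
    (fun q le => if q.1.getD le 0 ≠ 0 then (q.1.set q.2.toNat (q.1.getD le 0), q.2 - 1) else q)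
    (row, (cols : Int) - 1)

-- Source B's second inner loop: zero out positions 0..escreve (range(escreve+1)).
def pvBrow (cols : Nat) (row : List Int) : List Int :=
  (List.range ((pvBmain cols row).2 + 1).toNat).foldl (fun r i => r.set i 0) (pvBmain cols row).1

def deslizar_para_direita_alt (matriz : List (List Int)) : List (List Int) × Bool :=
  matriz.foldl
    (fun st linha =>
      (st.1 ++ [pvBrow (pvCols matriz) linha],
       if pvBrow (pvCols matriz) linha ≠ linha then true else st.2))
    ([], false)

-- ===== PRECONDITION & SPEC =====
-- Pre_ is exactly A's return domain: A indexes every row by the columns 0..len(matriz[0])-1, so it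
-- raises IndexError iff some row is shorter than row 0; B raises on the same inputs.
def Pre_deslizar_para_direita (matriz : List (List Int)) : Prop :=
  ∀ r ∈ matriz, (matriz.headD []).length ≤ r.length
instance (matriz : List (List Int)) : Decidable (Pre_deslizar_para_direita matriz) := by
  unfold Pre_deslizar_para_direita; infer_instance

def pvWitness_deslizar_para_direita : List (List Int) := [[0, 2, 0], [4, 0, 8]]

def Spec_deslizar_para_direita (matriz : List (List Int)) (out : List (List Int) × Bool) : Prop := out = deslizar_para_direita_alt matriz
instance (matriz : List (List Int)) (out : List (List Int) × Bool) : Decidable (Spec_deslizar_para_direita matriz out) := by unfold Spec_deslizar_para_direita; infer_instance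

-- ===== CLAIM (what is proved, stated in full; the proofs are below) =====
def Claim_equal_deslizar_para_direita : Prop := ∀ (matriz : List (List Int)), Dom_deslizar_para_direita matriz → Pre_deslizar_para_direita matriz → Spec_deslizar_para_direita matriz (deslizar_para_direita matriz)

-- ===== LEMMAS AND PROOFS =====

-- the common per-row result on the first n columns: non-zeros kept in order, slid right,
-- zeros padded on the left; columns beyond n are untouched
def pvFilt (row : List Int) : List Int := row.filter (fun v => v ≠ 0)

def pvSlide (row : List Int) : List Int :=
  List.replicate (row.length - (pvFilt row).length) 0 ++ pvFilt row

-- the per-cell value A's second loop writes at column i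
def pvTgt (n k : Nat) (vals : List Int) (i : Nat) : Int :=
  if n - k ≤ i then vals.getD (k - 1 - (i - (n - k))) 0 else 0

theorem pvFilt_length_le (row : List Int) : (pvFilt row).length ≤ row.length :=
  List.length_filter_le _ _

theorem pvSlide_length (row : List Int) : (pvSlide row).length = row.length := by
  have := pvFilt_length_le row
  simp [pvSlide]; omega

theorem pvAvalsAux (row : List Int) :
    ∀ m, m ≤ row.length → ∀ acc : List Int,
    ((List.range m).reverse).foldl
        (fun acc c => if row.getD c 0 ≠ 0 then acc ++ [row.getD c 0] else acc) acc
      = acc ++ (pvFilt (row.take m)).reverse := by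
  intro m
  induction m with
  | zero => intro _ acc; simp [pvFilt]
  | succ m ih =>
    intro hm acc
    have hmr : m < row.length := by omega
    rw [List.range_succ, List.reverse_append]
    simp only [List.reverse_singleton, List.singleton_append, List.foldl_cons]
    have htake : row.take (m + 1) = row.take m ++ [row[m]] := by
      rw [List.take_succ, List.getElem?_eq_getElem hmr]; rfl
    have hget : row.getD m 0 = row[m] := List.getD_eq_getElem _ _ hmr
    by_cases hz : row[m] = 0
    · rw [if_neg (by rw [hget]; simp [hz]), ih (by omega)]
      unfold pvFilt
      rw [htake, List.filter_append]
      simp [hz]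
    · rw [if_pos (by rw [hget]; exact hz), ih (by omega)]
      unfold pvFilt
      rw [htake, List.filter_append]
      simp [hz, List.getElem?_eq_getElem hmr]

theorem pvTgt_map (row : List Int) :
    (List.range row.length).map (pvTgt row.length (pvFilt row).length ((pvFilt row).reverse)) = pvSlide row := by
  have hk := pvFilt_length_le row
  apply List.ext_getElem
  · simp [pvSlide_length]
  · intro i h1 h2
    simp only [List.getElem_map, List.getElem_range]
    have h1' : i < row.length := by simpa using h1
    unfold pvSlide
    rw [List.getElem_append]
    unfold pvTgt
    split
    · rename_i hge
      rw [dif_neg (by simp [List.length_replicate]; omega)]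
      have hrl : (pvFilt row).length - 1 - (i - (row.length - (pvFilt row).length))
                   < ((pvFilt row).reverse).length := by simp; omega
      rw [List.getD_eq_getElem _ _ hrl, List.getElem_reverse]
      congr 1
      simp only [List.length_replicate, List.length_reverse]
      omega
    · rename_i hlt
      rw [dif_pos (by simp [List.length_replicate]; omega)]
      simp

theorem pvAnyCongrMem {l : List Nat} {p q : Nat → Bool} (h : ∀ a ∈ l, p a = q a) :
    l.any p = l.any q := by
  induction l with
  | nil => rfl
  | cons a t ih =>
    simp only [List.any_cons]
    rw [h a (by simp), ih (fun b hb => h b (by simp [hb]))]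

theorem pvAloop (n k : Nat) (vals : List Int) :
    ∀ m, m ≤ n → ∀ (cur : List Int) (flag : Bool), n ≤ cur.length →
    ((List.range m).reverse).foldl (pvAstep n k vals) (cur, flag)
      = ((List.range m).map (pvTgt n k vals) ++ cur.drop m,
         flag || ((List.range m).any (fun i => cur.getD i 0 != pvTgt n k vals i))) := by
  intro m
  induction m with
  | zero => intro _ cur flag _; simp
  | succ m ih =>
    intro hm cur flag hlen
    have hmn : m < n := by omega
    have hmc : m < cur.length := by omega
    rw [List.range_succ, List.reverse_append]
    simp only [List.reverse_singleton, List.singleton_append, List.foldl_cons]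
    have hstep : pvAstep n k vals (cur, flag) m
        = (cur.set m (pvTgt n k vals m),
           if cur.getD m 0 ≠ pvTgt n k vals m then true else flag) := by
      by_cases h : n - k ≤ m <;> simp [pvAstep, pvTgt, h]
    rw [hstep, ih (by omega) _ _ (by simpa using hlen)]
    have hset : cur.set m (pvTgt n k vals m)
        = cur.take m ++ pvTgt n k vals m :: cur.drop (m + 1) := by
      rw [List.set_eq_take_append_cons_drop, if_pos hmc]
    refine congrArg₂ Prod.mk ?_ ?_
    · rw [List.map_append, List.map_singleton, List.append_assoc]
      congr 1
      rw [hset, List.drop_left' (by simp [List.length_take]; omega)]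
      simp
    · have hgetset : ∀ a ∈ List.range m,
          ((cur.set m (pvTgt n k vals m)).getD a 0 != pvTgt n k vals a)
            = (cur.getD a 0 != pvTgt n k vals a) := by
        intro a ha
        have ham : a < m := by simpa [List.mem_range] using ha
        congr 1
        rw [List.getD_eq_getElem _ _ (by simp; omega), List.getD_eq_getElem _ _ (by omega)]
        exact List.getElem_set_ne (by omega) _
      rw [pvAnyCongrMem hgetset, List.any_append]
      simp only [List.any_cons, List.any_nil, Bool.or_false]
      have hg : cur[m]? = some cur[m] := List.getElem?_eq_getElem hmc
      by_cases h : cur[m] = pvTgt n k vals m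
      · simp [hg, h, List.getD_eq_getElem _ _ hmc]
      · simp [hg, h, List.getD_eq_getElem _ _ hmc, Bool.or_comm, Bool.or_assoc,
              Bool.or_left_comm]

theorem pvAny_diff (cur tgtl : List Int) (h : cur.length = tgtl.length) :
    ((List.range cur.length).any (fun i => cur.getD i 0 != tgtl.getD i 0)) = decide (tgtl ≠ cur) := by
  by_cases heq : tgtl = cur
  · subst heq; simp
  · simp only [ne_eq, heq, not_false_eq_true, decide_true]
    rw [List.any_eq_true]
    by_contra hall
    push_neg at hall
    apply heq
    apply List.ext_getElem h.symm
    intro i h1 h2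
    have hi := hall i (by simpa [List.mem_range] using h2)
    rw [List.getD_eq_getElem _ _ h2, List.getD_eq_getElem _ _ h1] at hi
    simp only [bne_iff_ne, ne_eq, not_not] at hi
    exact hi.symm

theorem pvBloop (u tail : List Int) : ∀ m, m ≤ u.length →
    ((List.range m).reverse).foldl
      (fun q le => if q.1.getD le 0 ≠ 0 then (q.1.set q.2.toNat (q.1.getD le 0), q.2 - 1) else q)
      (u.take (u.length - (pvFilt (u.drop m)).length) ++ (pvFilt (u.drop m) ++ tail),
       (u.length : Int) - (pvFilt (u.drop m)).length - 1)
    = (u.take (u.length - (pvFilt u).length) ++ (pvFilt u ++ tail),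
       (u.length : Int) - (pvFilt u).length - 1) := by
  intro m
  induction m with
  | zero => intro _; simp
  | succ m ih =>
    intro hm
    have hmr : m < u.length := by omega
    have hk1 : (pvFilt (u.drop (m + 1))).length ≤ u.length - (m + 1) := by
      have := List.length_filter_le (fun v => decide ¬v = 0) (u.drop (m + 1))
      simpa [pvFilt, List.length_drop] using this
    have hread : (u.take (u.length - (pvFilt (u.drop (m + 1))).length)
          ++ (pvFilt (u.drop (m + 1)) ++ tail)).getD m 0 = u[m] := by
      rw [List.getD_append _ _ _ m (by simp [List.length_take]; omega)]
      rw [List.getD_eq_getElem _ _ (by simp [List.length_take]; omega)]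
      exact List.getElem_take
    have hdropm : u.drop m = u[m] :: u.drop (m + 1) := List.drop_eq_getElem_cons hmr
    rw [List.range_succ, List.reverse_append]
    simp only [List.reverse_singleton, List.singleton_append, List.foldl_cons]
    by_cases hz : u[m] = 0
    · have hfilt : pvFilt (u.drop m) = pvFilt (u.drop (m + 1)) := by
        unfold pvFilt
        rw [hdropm, List.filter_cons_of_neg (by simp [hz])]
      rw [if_neg (by rw [hread]; simp [hz])]
      have ihm := ih (by omega)
      rw [hfilt] at ihm
      exact ihm
    · have hfilt : pvFilt (u.drop m) = u[m] :: pvFilt (u.drop (m + 1)) := by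
        unfold pvFilt
        rw [hdropm, List.filter_cons_of_pos (by simp [hz])]
      rw [if_pos (by rw [hread]; exact hz), hread]
      have htn : ((u.length : Int) - (pvFilt (u.drop (m + 1))).length - 1).toNat
          = u.length - (pvFilt (u.drop (m + 1))).length - 1 := by omega
      have hsetix : u.length - (pvFilt (u.drop (m + 1))).length - 1
          < (u.take (u.length - (pvFilt (u.drop (m + 1))).length)).length := by
        simp [List.length_take]; omega
      have hmin : min (u.length - (pvFilt (u.drop (m + 1))).length - 1)
            (u.length - (pvFilt (u.drop (m + 1))).length)
          = u.length - ((pvFilt (u.drop (m + 1))).length + 1) := by omega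
      have hset : (u.take (u.length - (pvFilt (u.drop (m + 1))).length)
            ++ (pvFilt (u.drop (m + 1)) ++ tail)).set
            (u.length - (pvFilt (u.drop (m + 1))).length - 1) u[m]
          = u.take (u.length - ((pvFilt (u.drop (m + 1))).length + 1))
            ++ ((u[m] :: pvFilt (u.drop (m + 1))) ++ tail) := by
        rw [List.set_append, if_pos hsetix]
        rw [List.set_eq_take_append_cons_drop, if_pos hsetix]
        rw [List.take_take, List.drop_take]
        rw [show u.length - (pvFilt (u.drop (m + 1))).length
              - (u.length - (pvFilt (u.drop (m + 1))).length - 1 + 1) = 0 by omega]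
        rw [hmin]
        simp
      rw [htn, hset]
      have ihm := ih (by omega)
      rw [hfilt] at ihm
      simp only [List.length_cons] at ihm
      rw [show (u.length : Int) - (pvFilt (u.drop (m + 1))).length - 1 - 1
            = (u.length : Int) - ((pvFilt (u.drop (m + 1))).length + 1) - 1 by push_cast; ring]
      exact_mod_cast ihm

theorem pvBmain_eq (cols : Nat) (row : List Int) (h : cols ≤ row.length) :
    pvBmain cols row
      = (row.take (cols - (pvFilt (row.take cols)).length)
           ++ (pvFilt (row.take cols) ++ row.drop cols),
         (cols : Int) - (pvFilt (row.take cols)).length - 1) := by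
  unfold pvBmain
  have hu : (row.take cols).length = cols := by rw [List.length_take]; omega
  have hnil : pvFilt ([] : List Int) = [] := rfl
  have hb := pvBloop (row.take cols) (row.drop cols) (row.take cols).length le_rfl
  rw [List.drop_length] at hb
  simp only [hnil, List.length_nil, Nat.sub_zero, List.take_length,
    List.nil_append, Nat.cast_zero, sub_zero, List.take_append_drop] at hb
  rw [hu] at hb
  rw [hb]
  rw [List.take_take, show min (cols - (pvFilt (row.take cols)).length) cols
        = cols - (pvFilt (row.take cols)).length by omega]

theorem pvZeroLoop (l : List Int) : ∀ m, m ≤ l.length →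
    (List.range m).foldl (fun r i => r.set i 0) l = List.replicate m 0 ++ l.drop m := by
  intro m
  induction m with
  | zero => intro _; simp
  | succ m ih =>
    intro hm
    rw [List.range_succ, List.foldl_append, ih (by omega)]
    simp only [List.foldl_cons, List.foldl_nil]
    rw [List.set_append, if_neg (by simp)]
    simp only [List.length_replicate, Nat.sub_self]
    rw [List.drop_eq_getElem_cons (show m < l.length by omega)]
    rw [show (l[m] :: l.drop (m + 1)).set 0 0 = 0 :: l.drop (m + 1) from rfl]
    rw [List.replicate_succ', List.append_assoc, List.singleton_append]

theorem pvBrow_eq (cols : Nat) (row : List Int) (h : cols ≤ row.length) :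
    pvBrow cols row = pvSlide (row.take cols) ++ row.drop cols := by
  have hk : (pvFilt (row.take cols)).length ≤ cols := by
    have := pvFilt_length_le (row.take cols)
    rw [List.length_take] at this; omega
  unfold pvBrow
  rw [pvBmain_eq cols row h]
  rw [show ((cols : Int) - (pvFilt (row.take cols)).length - 1 + 1).toNat
        = cols - (pvFilt (row.take cols)).length by omega]
  rw [pvZeroLoop _ _ (by
    simp only [List.length_append, List.length_take, List.length_drop]; omega)]
  have h1 : (row.take (cols - (pvFilt (row.take cols)).length)).length
      = cols - (pvFilt (row.take cols)).length := by rw [List.length_take]; omega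
  rw [List.drop_left' h1]
  unfold pvSlide
  rw [show (row.take cols).length = cols by rw [List.length_take]; omega]
  rw [List.append_assoc]

theorem pvArow_eq (n : Nat) (st : List (List Int) × Bool) (linha : Nat)
    (hrow : n ≤ (st.1.getD linha []).length) :
    pvArow n st linha
      = (st.1.set linha
           (pvSlide ((st.1.getD linha []).take n) ++ (st.1.getD linha []).drop n),
         st.2 || decide (pvSlide ((st.1.getD linha []).take n)
           ≠ (st.1.getD linha []).take n)) := by
  unfold pvArow
  have hu : ((st.1.getD linha []).take n).length = n := by rw [List.length_take]; omega
  have hvals : pvAvals n (st.1.getD linha [])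
      = (pvFilt ((st.1.getD linha []).take n)).reverse := by
    unfold pvAvals
    rw [pvAvalsAux (st.1.getD linha []) n hrow []]
    simp
  simp only [hvals, List.length_reverse]
  rw [pvAloop _ _ _ _ le_rfl _ _ hrow]
  have hmap : (List.range n).map
        (pvTgt n (pvFilt ((st.1.getD linha []).take n)).length
          ((pvFilt ((st.1.getD linha []).take n)).reverse))
      = pvSlide ((st.1.getD linha []).take n) := by
    rw [← pvTgt_map ((st.1.getD linha []).take n), hu]
  rw [hmap]
  have hany : (List.range n).any
        (fun i => (st.1.getD linha []).getD i 0
          != pvTgt n (pvFilt ((st.1.getD linha []).take n)).length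
               ((pvFilt ((st.1.getD linha []).take n)).reverse) i)
      = decide (pvSlide ((st.1.getD linha []).take n) ≠ (st.1.getD linha []).take n) := by
    rw [pvAnyCongrMem (q := fun i => ((st.1.getD linha []).take n).getD i 0
          != (pvSlide ((st.1.getD linha []).take n)).getD i 0) (fun a ha => by
      have ham : a < n := by simpa [List.mem_range] using ha
      congr 1
      · rw [List.getD_eq_getElem (st.1.getD linha []) 0
              (show a < (st.1.getD linha []).length by omega),
            List.getD_eq_getElem ((st.1.getD linha []).take n) 0
              (show a < ((st.1.getD linha []).take n).length by rw [hu]; exact ham)]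
        exact List.getElem_take.symm
      · rw [← hmap]
        exact (PySem.List.getD_map_range _ _ _ _ ham).symm)]
    have hd := pvAny_diff ((st.1.getD linha []).take n)
        (pvSlide ((st.1.getD linha []).take n)) (by rw [pvSlide_length])
    rw [hu] at hd
    exact hd
  rw [hany]

theorem pvOuterA (n0 : Nat) :
    ∀ (todo done : List (List Int)) (flag : Bool),
      ((done ++ todo) ≠ [] → ((done ++ todo).getD 0 []).length = n0) →
      (∀ r ∈ todo, n0 ≤ r.length) →
      (List.range' done.length todo.length).foldl
          (fun st linha => pvArow ((st.1.getD 0 []).length) st linha) (done ++ todo, flag)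
        = (done ++ todo.map (fun r => pvSlide (r.take n0) ++ r.drop n0),
           todo.foldl (fun f r => f || decide (pvSlide (r.take n0) ≠ r.take n0)) flag) := by
  intro todo
  induction todo with
  | nil => intro done flag _ _; simp
  | cons r rest ih =>
    intro done flag hfirst htodo
    simp only [List.length_cons]
    rw [List.range'_succ]
    simp only [List.foldl_cons]
    have hrlen : n0 ≤ r.length := htodo r (by simp)
    have hrowval : (done ++ r :: rest).getD done.length [] = r := by
      rw [List.getD_append_right _ _ _ _ le_rfl]; simp
    have hn : (((done ++ r :: rest).getD 0 []).length) = n0 :=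
      hfirst (by simp)
    have hslen : (pvSlide (r.take n0) ++ r.drop n0).length = r.length := by
      rw [List.length_append, pvSlide_length, List.length_take, List.length_drop]
      omega
    have hstep : pvArow (((done ++ r :: rest).getD 0 []).length) (done ++ r :: rest, flag) done.length
        = ((done ++ [pvSlide (r.take n0) ++ r.drop n0]) ++ rest,
           flag || decide (pvSlide (r.take n0) ≠ r.take n0)) := by
      rw [hn, pvArow_eq n0 (done ++ r :: rest, flag) done.length
            (by show n0 ≤ ((done ++ r :: rest).getD done.length []).length
                rw [hrowval]; exact hrlen)]
      show ((done ++ r :: rest).set done.length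
              (pvSlide (((done ++ r :: rest).getD done.length []).take n0)
                ++ ((done ++ r :: rest).getD done.length []).drop n0),
            flag || decide (pvSlide (((done ++ r :: rest).getD done.length []).take n0)
              ≠ ((done ++ r :: rest).getD done.length []).take n0)) = _
      rw [hrowval, List.set_append, if_neg (by simp)]
      simp
    rw [hstep]
    rw [show done.length + 1 = (done ++ [pvSlide (r.take n0) ++ r.drop n0]).length by simp]
    rw [ih (done ++ [pvSlide (r.take n0) ++ r.drop n0])
          (flag || decide (pvSlide (r.take n0) ≠ r.take n0))
          (by intro hne
              cases done with
              | nil =>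
                simp only [List.nil_append, List.getD_cons_zero] at hn
                simp only [List.nil_append, List.singleton_append, List.getD_cons_zero]
                rw [hslen]; exact hn
              | cons d ds =>
                simp only [List.cons_append, List.getD_cons_zero] at hn ⊢
                exact hn)
          (fun x hx => htodo x (by simp [hx]))]
    simp

theorem pvOuterB (cols : Nat) :
    ∀ (rows : List (List Int)) (acc : List (List Int)) (flag : Bool),
      (∀ r ∈ rows, cols ≤ r.length) →
      rows.foldl
          (fun st linha => (st.1 ++ [pvBrow cols linha],
             if pvBrow cols linha ≠ linha then true else st.2))
          (acc, flag)
        = (acc ++ rows.map (fun r => pvSlide (r.take cols) ++ r.drop cols),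
           rows.foldl (fun f r => f || decide (pvSlide (r.take cols) ≠ r.take cols)) flag) := by
  intro rows
  induction rows with
  | nil => intro acc flag _; simp
  | cons r rest ih =>
    intro acc flag hrows
    have hr : cols ≤ r.length := hrows r (by simp)
    simp only [List.foldl_cons, List.map_cons]
    have hne : (pvBrow cols r ≠ r) ↔ (pvSlide (r.take cols) ≠ r.take cols) := by
      rw [pvBrow_eq cols r hr]
      constructor
      · intro hx hc
        apply hx
        rw [hc]
        exact List.take_append_drop cols r
      · intro hx hc
        apply hx
        have := hc.trans (List.take_append_drop cols r).symm
        exact List.append_cancel_right this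
    have hif : (if pvBrow cols r ≠ r then true else flag)
        = (flag || decide (pvSlide (r.take cols) ≠ r.take cols)) := by
      by_cases h : pvSlide (r.take cols) ≠ r.take cols
      · rw [if_pos (hne.mpr h)]; simp [h]
      · rw [if_neg (fun hx => h (hne.mp hx))]; simp [h]
    rw [hif, pvBrow_eq cols r hr,
        ih (acc ++ [pvSlide (r.take cols) ++ r.drop cols])
          (flag || decide (pvSlide (r.take cols) ≠ r.take cols))
          (fun x hx => hrows x (by simp [hx]))]
    simp

theorem pvCols_eq (matriz : List (List Int)) : pvCols matriz = (matriz.headD []).length := by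
  cases matriz <;> simp [pvCols]

-- ===== VERDICT (by name: the statement is the Claim_ definition above) =====
theorem deslizar_para_direita_spec : Claim_equal_deslizar_para_direita := by
  intro matriz _ hpre
  unfold Spec_deslizar_para_direita
  unfold deslizar_para_direita deslizar_para_direita_alt
  rw [List.range_eq_range']
  have hA := pvOuterA ((matriz.headD []).length) matriz [] false
    (by intro hne
        cases matriz with
        | nil => simp at hne
        | cons r rs => simp)
    (by exact hpre)
  simp only [List.length_nil, List.nil_append] at hA
  rw [hA]
  rw [pvCols_eq]
  rw [pvOuterB ((matriz.headD []).length) matriz [] false (by exact hpre)]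
  simp
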